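-- pv_equiv track=rewrite | github.com/ftzm/dailyprogrammer | easy/26/highest_num.py | str_sep
-- ===== SOURCE A (Python) =====
-- def str_sep(s):
--     s = list(s)
--     other = ""
--     i = 0
--     j = len(s)
--     last = ""
--     while i < j:
--         if s[i] == last:
--             other += s.pop(i)
--             j -= 1
--         else:
--             last = s[i]
--             i += 1
--     return " ".join(["".join(s), other])
-- ===== SOURCE B (Python) =====
-- def str_sep(s):
--     kept = []
--     other = []
--     last = ""
--     for c in s:
--         if c == last:
--             other.append(c)
--         else:
--             kept.append(c)
--             last = c
--     return "".join(kept) + " " + "".join(other)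
-- ===== Notes on version B (the rewrite author's own statement) =====
-- stated objective: faster
-- what changed: Replaced the in-place while loop that pops duplicate chars out of the list (O(n) per pop) with a single forward pass appending each char to one of two lists depending on whether it equals the last kept char.
import Mathlib
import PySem

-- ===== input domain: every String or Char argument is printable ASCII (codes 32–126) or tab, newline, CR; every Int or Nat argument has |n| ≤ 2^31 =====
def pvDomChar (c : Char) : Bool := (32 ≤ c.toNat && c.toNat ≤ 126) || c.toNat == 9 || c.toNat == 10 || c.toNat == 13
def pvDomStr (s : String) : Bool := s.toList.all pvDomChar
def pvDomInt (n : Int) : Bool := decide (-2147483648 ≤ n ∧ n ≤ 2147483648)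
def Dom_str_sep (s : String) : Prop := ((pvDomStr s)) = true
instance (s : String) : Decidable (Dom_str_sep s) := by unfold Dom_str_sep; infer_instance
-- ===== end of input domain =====

-- B replaces A's quadratic pop-in-place while loop by one linear forward pass into two buffers (objective: faster).

-- ===== PORT A =====
-- A's while loop over mutable list s, indices i < j; 'last : Option Char' encodes
-- Python's last, initially "" (none), which never equals a one-char string (exact).
-- The 'none' getElem? branch is an unreachable totality guard (i < j ≤ s.length throughout).
def strSepLoop (s other : List Char) (i j : Nat) (last : Option Char) : List Char × List Char :=
  if h : i < j then
    match s[i]? with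
    | none => (s, other)
    | some c =>
      if some c = last then
        strSepLoop (s.take i ++ s.drop (i + 1)) (other ++ [c]) i (j - 1) last
      else
        strSepLoop s other (i + 1) j (some c)
  else (s, other)
termination_by j - i
decreasing_by
  · omega
  · omega

def str_sep (s : String) : String :=
  let r := strSepLoop s.toList [] 0 s.toList.length none
  String.mk r.1 ++ " " ++ String.mk r.2

-- ===== PORT B =====
-- one pass; state (kept, other, last)
def strSepStep (st : List Char × List Char × Option Char) (c : Char) :
    List Char × List Char × Option Char :=
  if some c = st.2.2 then (st.1, st.2.1 ++ [c], st.2.2)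
  else (st.1 ++ [c], st.2.1, some c)

def str_sep_alt (s : String) : String :=
  let st := s.toList.foldl strSepStep ([], [], none)
  String.mk st.1 ++ " " ++ String.mk st.2.1

-- ===== PRECONDITION & SPEC =====
def Spec_str_sep (s : String) (out : String) : Prop := out = str_sep_alt s
instance (s : String) (out : String) : Decidable (Spec_str_sep s out) := by unfold Spec_str_sep; infer_instance

-- ===== CLAIM (what is proved, stated in full; the proofs are below) =====
def Claim_equal_str_sep : Prop := ∀ (s : String), Dom_str_sep s → Spec_str_sep s (str_sep s)

-- ===== LEMMAS AND PROOFS =====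

-- Invariant: the processed prefix 'kept' stays in place; the loop on kept ++ rest at
-- index i = kept.length equals B's fold over rest.
theorem strSepLoop_eq_foldl (rest kept other : List Char) (last : Option Char) :
    strSepLoop (kept ++ rest) other kept.length (kept.length + rest.length) last =
      (let st := rest.foldl strSepStep (kept, other, last); (st.1, st.2.1)) := by
  induction rest generalizing kept other last with
  | nil =>
    simp [strSepLoop]
  | cons c rest ih =>
    rw [strSepLoop]
    have hlt : kept.length < kept.length + (c :: rest).length := by simp
    rw [dif_pos hlt]
    have hget : (kept ++ c :: rest)[kept.length]? = some c := by
      rw [List.getElem?_append_right (le_refl _)]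
      simp
    rw [hget]; dsimp only
    by_cases hc : some c = last
    · rw [if_pos hc]
      have ht : (kept ++ c :: rest).take kept.length = kept := by
        simp
      have hd : (kept ++ c :: rest).drop (kept.length + 1) = rest := by
        simp [List.drop_append]
      rw [ht, hd]
      have hlen : kept.length + (c :: rest).length - 1 = kept.length + rest.length := by
        simp
      rw [hlen, ih kept (other ++ [c]) last]
      simp [strSepStep, hc]
    · rw [if_neg hc]
      have h1 : kept ++ c :: rest = (kept ++ [c]) ++ rest := by simp
      have h2 : kept.length + 1 = (kept ++ [c]).length := by simp
      have h3 : kept.length + (c :: rest).length = (kept ++ [c]).length + rest.length := by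
        simp; omega
      rw [h1, h2, h3, ih (kept ++ [c]) other (some c)]
      simp [strSepStep, hc]

-- ===== VERDICT (by name: the statement is the Claim_ definition above) =====
theorem str_sep_spec : Claim_equal_str_sep := by
  intro s _
  unfold Spec_str_sep str_sep str_sep_alt
  have h := strSepLoop_eq_foldl s.toList [] [] none
  simpa using congrArg (fun r => String.mk r.1 ++ " " ++ String.mk r.2) h
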